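-- pv_equiv track=rewrite | github.com/shrapx/ludum_dare_32 | other/iso_draw_order.py | get_iso
-- ===== SOURCE A (Python) =====
-- def get_iso(square):
--   area = square*square
--   depth = 0
--   num_last_depth = 0
--   pos = 0
--   arr = []
--   while depth < (square*2):
--
--     if pos < square:
--       num_last_depth = (depth * square)
--       depth += 1
--       pos = num_last_depth
--     else:
--       pos = pos - square + 1
--
--     if pos < area:
--       if pos not in arr:
--         arr += [pos]
--
--   return arr
-- ===== SOURCE B (Python) =====
-- def get_iso(square):
--     out = []
--     for s in range(0, 2*square - 1):
--         for row in range(min(s, square - 1), max(0, s - square + 1) - 1, -1):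
--             out.append(row*square + (s - row))
--     return out
-- ===== Notes on version B (the rewrite author's own statement) =====
-- stated objective: faster
-- what changed: Replaces A's while-loop state machine (which walks positions downward and dedups with 'pos not in arr') by direct closed-form generation of the anti-diagonals of the square grid with two nested range loops, so no membership scan and no duplicate candidates are ever produced.
import Mathlib
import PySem

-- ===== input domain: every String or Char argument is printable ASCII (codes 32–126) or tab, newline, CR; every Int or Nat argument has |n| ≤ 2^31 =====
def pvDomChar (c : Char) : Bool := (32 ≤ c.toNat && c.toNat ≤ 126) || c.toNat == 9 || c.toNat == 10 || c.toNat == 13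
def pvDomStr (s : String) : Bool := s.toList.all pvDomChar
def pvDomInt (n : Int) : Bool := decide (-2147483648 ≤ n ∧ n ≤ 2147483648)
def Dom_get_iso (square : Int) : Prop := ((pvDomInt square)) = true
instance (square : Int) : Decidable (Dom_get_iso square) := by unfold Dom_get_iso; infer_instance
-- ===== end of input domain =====

-- B replaces A's while-loop state machine with dedup by direct closed-form generation of
-- the grid's anti-diagonals (objective: faster — no 'pos not in arr' scan, no duplicate candidates).

-- ===== PORT A =====
-- Python's while loop, transliterated with a fuel guard (the fuel only bounds the number of
-- iterations; the equivalence proof shows it is never exhausted).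
def get_iso_loop (square area : Int) : Nat → Int → Int → Int → List Int → List Int
  | 0, _, _, _, arr => arr
  | fuel+1, depth, num_last_depth, pos, arr =>
    if depth < square * 2 then
      -- if pos < square: num_last_depth = depth*square; depth += 1; pos = num_last_depth
      -- else: pos = pos - square + 1
      let st := if pos < square then (depth + 1, depth * square, depth * square)
                else (depth, num_last_depth, pos - square + 1)
      -- if pos < area: if pos not in arr: arr += [pos]
      let arr' := if st.2.2 < area ∧ st.2.2 ∉ arr then arr ++ [st.2.2] else arr
      get_iso_loop square area fuel st.1 st.2.1 st.2.2 arr'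
    else arr

def get_iso (square : Int) : List Int :=
  get_iso_loop square (square * square)
    ((2*square).toNat * ((2*square*square).toNat + 1) + 1) 0 0 0 []

-- ===== PORT B =====
def get_iso_alt (square : Int) : List Int :=
  (PySem.List.pyRange 0 (2*square - 1) 1).foldl (fun out s =>
    (PySem.List.pyRange (min s (square - 1)) (max 0 (s - square + 1) - 1) (-1)).foldl
      (fun out row => out ++ [row * square + (s - row)]) out) []

-- ===== PRECONDITION & SPEC =====
def Spec_get_iso (square : Int) (out : List Int) : Prop := out = get_iso_alt square
instance (square : Int) (out : List Int) : Decidable (Spec_get_iso square out) := by unfold Spec_get_iso; infer_instance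

-- ===== CLAIM (what is proved, stated in full; the proofs are below) =====
def Claim_equal_get_iso : Prop := ∀ (square : Int), Dom_get_iso square → Spec_get_iso square (get_iso square)

-- ===== LEMMAS AND PROOFS =====

-- pyRange with step -1: explicit representation and its consequences
theorem pyRange_neg_one_repr (a b : Int) :
    PySem.List.pyRange a b (-1) = (List.range (a - b).toNat).map (fun k : Nat => a - (k : Int)) := by
  have h0 : PySem.List.pyRange a b (-1)
      = List.map (fun k : Nat => a + (-1) * (k : Int))
          (List.range (if b < a then ((a - b + -(-1) - 1) / -(-1)).toNat else 0)) := rfl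
  rw [h0]
  by_cases h : b < a
  · rw [if_pos h, show (a - b + -(-1) - 1) / -(-1) = a - b from by simp only [neg_neg]; omega]
    exact List.map_congr_left (fun k _ => by ring)
  · rw [if_neg h, show (a - b).toNat = 0 from by omega]
    simp

theorem pyRange_neg_one_empty {a b : Int} (h : a ≤ b) : PySem.List.pyRange a b (-1) = [] := by
  rw [pyRange_neg_one_repr]
  have : (a - b).toNat = 0 := by omega
  simp [this]

theorem pyRange_neg_one_append {a b : Int} (h : b ≤ a) :
    PySem.List.pyRange a (b - 1) (-1) = PySem.List.pyRange a b (-1) ++ [b] := by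
  rw [pyRange_neg_one_repr, pyRange_neg_one_repr,
      show (a - (b - 1)).toNat = (a - b).toNat + 1 from by omega,
      List.range_succ, List.map_append]
  congr 1
  simp only [List.map_cons, List.map_nil, List.cons.injEq, and_true]
  omega

theorem pyRange_neg_one_singleton (a : Int) : PySem.List.pyRange a (a - 1) (-1) = [a] := by
  rw [pyRange_neg_one_append (le_refl a), pyRange_neg_one_empty (le_refl a)]
  simp

theorem pyRange_one_empty {a b : Int} (h : b ≤ a) : PySem.List.pyRange a b 1 = [] := by
  refine List.eq_nil_iff_forall_not_mem.mpr (fun x hx => ?_)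
  rw [PySem.List.mem_pyRange_one] at hx
  omega

-- the anti-diagonal s of the n×n grid, rows from min s (n-1) down to lo
def diagFrom (n s lo : Int) : List Int :=
  (PySem.List.pyRange (min s (n-1)) (lo - 1) (-1)).map (fun r => r*n + (s - r))

-- the first d full anti-diagonals, concatenated
def bpref (n d : Int) : List Int :=
  (PySem.List.pyRange 0 d 1).flatMap (fun s => diagFrom n s (max 0 (s - n + 1)))

theorem mem_diagFrom {n s lo v : Int} :
    v ∈ diagFrom n s lo ↔ ∃ r, lo ≤ r ∧ r ≤ min s (n-1) ∧ v = r*n + (s - r) := by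
  simp [diagFrom, List.mem_map]
  constructor
  · rintro ⟨r, ⟨h1, h2⟩, rfl⟩; exact ⟨r, by omega, by omega, rfl⟩
  · rintro ⟨r, h1, h2, rfl⟩; exact ⟨r, ⟨by omega, by omega⟩, rfl⟩

theorem cell_inj {n r₁ c₁ r₂ c₂ : Int} (hc₁ : 0 ≤ c₁) (hc₁' : c₁ < n) (hc₂ : 0 ≤ c₂)
    (hc₂' : c₂ < n) (h : r₁*n + c₁ = r₂*n + c₂) : r₁ = r₂ ∧ c₁ = c₂ := by
  have hn : 0 < n := by omega
  have key : r₁ = r₂ := by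
    rcases lt_trichotomy r₁ r₂ with hlt | heq | hgt
    · nlinarith
    · exact heq
    · nlinarith
  refine ⟨key, ?_⟩
  subst key; omega

theorem mem_bpref {n d v : Int} (_hd : 0 ≤ d) :
    v ∈ bpref n d ↔ ∃ r c, 0 ≤ r ∧ r < n ∧ 0 ≤ c ∧ c < n ∧ r + c < d ∧ v = r*n + c := by
  simp only [bpref, List.mem_flatMap, PySem.List.mem_pyRange_one, mem_diagFrom]
  constructor
  · rintro ⟨s, ⟨hs0, hsd⟩, r, h1, h2, rfl⟩
    exact ⟨r, s - r, by omega, by omega, by omega, by omega, by omega, rfl⟩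
  · rintro ⟨r, c, h1, h2, h3, h4, h5, rfl⟩
    exact ⟨r + c, ⟨by omega, by omega⟩, r, by omega, by omega, by ring⟩

theorem cell_mem_bpref_iff {n d r c : Int} (hd : 0 ≤ d) (hr : 0 ≤ r) (hr' : r < n)
    (hc : 0 ≤ c) (hc' : c < n) : r*n + c ∈ bpref n d ↔ r + c < d := by
  rw [mem_bpref hd]
  constructor
  · rintro ⟨r₂, c₂, h1, h2, h3, h4, h5, heq⟩
    obtain ⟨rfl, rfl⟩ := cell_inj h3 h4 hc hc' heq.symm
    exact h5
  · intro h; exact ⟨r, c, hr, hr', hc, hc', h, rfl⟩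

theorem bpref_succ {n d : Int} (hd : 0 ≤ d) :
    bpref n (d + 1) = bpref n d ++ diagFrom n d (max 0 (d - n + 1)) := by
  unfold bpref
  rw [PySem.List.pyRange_one_succ_right hd, List.flatMap_append]
  simp

theorem foldl_append_flatMap {α β : Type} (g : α → List β) (l : List α) (acc : List β) :
    l.foldl (fun acc x => acc ++ g x) acc = acc ++ l.flatMap g := by
  induction l generalizing acc with
  | nil => simp
  | cons x xs ih => simp [List.foldl_cons, ih, List.flatMap_cons]

theorem alt_eq_bpref (n : Int) : get_iso_alt n = bpref n (2*n - 1) := by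
  unfold get_iso_alt bpref
  simp only [PySem.List.foldl_append_singleton_eq_map]
  rw [show (fun (out : List Int) s =>
      out ++ (PySem.List.pyRange (min s (n - 1)) (max 0 (s - n + 1) - 1) (-1)).map
        (fun row => row * n + (s - row))) = (fun out s => out ++ diagFrom n s (max 0 (s - n + 1))) from rfl]
  rw [foldl_append_flatMap]
  simp

theorem loop_main (n : Int) (hn : 2 ≤ n) :
    ∀ (f : Nat) (d k num pos : Int) (arr : List Int),
    0 ≤ d → d < 2*n → 0 ≤ k →
    pos = d*n - k*(n-1) →
    arr = bpref n d ++ diagFrom n d (max (d - k) (max 0 (d - n + 1))) →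
    (2*n - (d+1)).toNat * ((2*n*n).toNat + 1) + pos.toNat < f →
    get_iso_loop n (n*n) f (d+1) num pos arr = bpref n (2*n - 1) := by
  intro f
  induction f with
  | zero => intro d k num pos arr _ _ _ _ _ hf; omega
  | succ f ih =>
    intro d k num pos arr hd0 hd2n hk0 hpose harr hf
    by_cases hcond : d + 1 < n * 2
    case neg =>
      -- exit: d = 2n - 1, the pending diagonal is empty
      simp only [get_iso_loop, if_neg hcond]
      have hd : d = 2*n - 1 := by omega
      subst hd
      rw [harr, show diagFrom n (2*n-1) (max (2*n-1-k) (max 0 (2*n-1-n+1))) = [] from ?_,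
          List.append_nil]
      unfold diagFrom
      rw [pyRange_neg_one_empty (by omega)]
      rfl
    case pos =>
      simp only [get_iso_loop, if_pos hcond]
      by_cases hpos : pos < n
      case pos =>
        -- if branch: the diagonal d is complete; start diagonal d+1 at its top cell (d+1)*n
        simp only [if_pos hpos]
        have hdk : d - k ≤ 0 := by
          by_contra hcon
          have h1 : 0 ≤ (d - k - 1) * n := mul_nonneg (by omega) (by omega)
          have he : pos - n - k = (d - k - 1) * n := by rw [hpose]; ring
          omega
        have harr2 : arr = bpref n (d + 1) := by
          rw [harr, bpref_succ hd0,
              show max (d - k) (max 0 (d - n + 1)) = max 0 (d - n + 1) from by omega]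
        have hfuel : ∀ q : Int, q ≤ 2*n →
            (2*n - (q+1)).toNat * ((2*n*n).toNat + 1) + ((d+1)*n).toNat < f → True := fun _ _ _ => trivial
        have hC : ((d+1)*n).toNat ≤ (2*n*n).toNat := by
          have h1 : (d+1)*n ≤ 2*n*n := by nlinarith
          omega
        have hsplit : (2*n - (d+1)).toNat * ((2*n*n).toNat + 1)
            = (2*n - (d+1+1)).toNat * ((2*n*n).toNat + 1) + ((2*n*n).toNat + 1) := by
          rw [show (2*n - (d+1)).toNat = (2*n - (d+1+1)).toNat + 1 from by omega]
          ring
        by_cases hsm : d + 1 < n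
        case pos =>
          -- the top cell is fresh and inside the grid: appended
          have hlt : (d+1)*n < n*n := by nlinarith
          have hnotmem : (d+1)*n ∉ arr := by
            rw [harr2]
            intro hmem
            rw [show (d+1)*n = (d+1)*n + 0 from by ring,
                cell_mem_bpref_iff (by omega) (by omega) (by omega) (by omega) (by omega)] at hmem
            omega
          simp only [if_pos (⟨hlt, hnotmem⟩ : (d+1)*n < n*n ∧ (d+1)*n ∉ arr)]
          apply ih (d+1) 0 _ _ _ (by omega) (by omega) (by omega) (by ring) ?_ (by omega)
          rw [harr2]
          congr 1
          rw [show max (d + 1 - 0) (max 0 (d + 1 - n + 1)) = d + 1 from by omega]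
          unfold diagFrom
          rw [show min (d+1) (n-1) = d + 1 from by omega, pyRange_neg_one_singleton (d+1)]
          simp
        case neg =>
          -- the top cell is outside the grid: skipped, diagonal d+1 starts empty
          have hge : ¬ ((d+1)*n < n*n ∧ (d+1)*n ∉ arr) := by
            rintro ⟨hlt, -⟩
            have : n*n ≤ (d+1)*n := mul_le_mul_of_nonneg_right (by omega) (by omega)
            omega
          simp only [if_neg hge]
          apply ih (d+1) 0 _ _ _ (by omega) (by omega) (by omega) (by ring) ?_ (by omega)
          rw [harr2]
          rw [show max (d + 1 - 0) (max 0 (d + 1 - n + 1)) = d + 1 from by omega]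
          rw [show diagFrom n (d+1) (d+1) = [] from ?_, List.append_nil]
          unfold diagFrom
          rw [pyRange_neg_one_empty (by omega)]
          rfl
      case neg =>
        -- else branch: pos ≥ n, step down the current diagonal
        simp only [if_neg hpos]
        have hre : pos - n + 1 = (d-k-1)*n + (k+1) := by rw [hpose]; ring
        have hposn : n ≤ pos := by omega
        by_cases h1 : n ≤ d - k - 1
        case pos =>
          -- row still above the grid: candidate ≥ area, skipped; both pending-lists empty
          have hskip : ¬ (pos - n + 1 < n*n ∧ pos - n + 1 ∉ arr) := by
            rintro ⟨hlt, -⟩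
            have hb : n*n ≤ (d-k-1)*n := mul_le_mul_of_nonneg_right h1 (by omega)
            omega
          simp only [if_neg hskip]
          apply ih d (k+1) num _ arr hd0 hd2n (by omega) (by rw [hpose]; ring) ?_ (by omega)
          rw [harr]
          rw [show diagFrom n d (max (d - k) (max 0 (d - n + 1))) = [] from ?_,
              show diagFrom n d (max (d - (k+1)) (max 0 (d - n + 1))) = [] from ?_]
          · unfold diagFrom; rw [pyRange_neg_one_empty (by omega)]; rfl
          · unfold diagFrom; rw [pyRange_neg_one_empty (by omega)]; rfl
        case neg =>
          by_cases h2 : max 0 (d - n + 1) ≤ d - k - 1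
          case pos =>
            -- a fresh cell of diagonal d: appended
            have hr0 : 0 ≤ d - k - 1 := by omega
            have hlt : pos - n + 1 < n*n := by
              have hb : (d-k-1)*n ≤ (n-1)*n := mul_le_mul_of_nonneg_right (by omega) (by omega)
              have hb2 : (n-1)*n = n*n - n := by ring
              omega
            have hnm1 : pos - n + 1 ∉ bpref n d := by
              rw [hre, cell_mem_bpref_iff hd0 hr0 (by omega) (by omega) (by omega)]
              omega
            have hnm2 : pos - n + 1 ∉ diagFrom n d (max (d - k) (max 0 (d - n + 1))) := by
              rw [show max (d - k) (max 0 (d - n + 1)) = d - k from by omega]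
              rw [mem_diagFrom]
              rintro ⟨r₂, hlo, hhi, heq⟩
              rw [hre] at heq
              obtain ⟨h3, -⟩ := cell_inj (by omega) (by omega) (by omega) (by omega) heq
              omega
            have hmem : pos - n + 1 ∉ arr := by
              rw [harr]
              intro hmem
              rcases List.mem_append.mp hmem with h | h
              · exact hnm1 h
              · exact hnm2 h
            simp only [if_pos (⟨hlt, hmem⟩ : pos - n + 1 < n*n ∧ pos - n + 1 ∉ arr)]
            apply ih d (k+1) num _ _ hd0 hd2n (by omega) (by rw [hpose]; ring) ?_ (by omega)
            rw [harr, List.append_assoc]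
            congr 1
            rw [show max (d - k) (max 0 (d - n + 1)) = d - k from by omega,
                show max (d - (k+1)) (max 0 (d - n + 1)) = d - k - 1 from by omega]
            unfold diagFrom
            rw [pyRange_neg_one_append (show d - k - 1 ≤ min d (n-1) from by omega)]
            simp only [List.map_append, List.map_cons, List.map_nil]
            rw [show (d-k-1)*n + (d - (d-k-1)) = pos - n + 1 from by rw [hpose]; ring]
          case neg =>
            -- a duplicate from an earlier diagonal (or a wrapped cell): in arr already, skipped
            have hnapp : ¬ (pos - n + 1 < n*n ∧ pos - n + 1 ∉ arr) := by
              rintro ⟨hlt, hnm⟩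
              apply hnm
              rw [harr]
              apply List.mem_append_left
              have hpos1 : 1 ≤ pos - n + 1 := by omega
              have hn0 : (0:Int) < n := by omega
              have ht0 : 0 ≤ (pos - n + 1) % n := Int.emod_nonneg _ (by omega)
              have ht1 : (pos - n + 1) % n < n := Int.emod_lt_of_pos _ hn0
              have hqt : ((pos - n + 1) / n) * n + (pos - n + 1) % n = pos - n + 1 := by
                rw [mul_comm]; exact Int.mul_ediv_add_emod _ n
              have hq0 : 0 ≤ (pos - n + 1) / n := Int.ediv_nonneg (by omega) (by omega)
              have hqn : (pos - n + 1) / n < n := by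
                by_contra hcon
                rw [Int.not_lt] at hcon
                have hb : n*n ≤ ((pos - n + 1) / n) * n := mul_le_mul_of_nonneg_right hcon (by omega)
                omega
              have hcge : n ≤ k + 1 := by
                by_contra hcon
                rw [Int.not_le] at hcon
                have hrneg : d - k - 1 < 0 := by omega
                have hb : (d-k-1)*n ≤ (-1)*n := mul_le_mul_of_nonneg_right (by omega) (by omega)
                omega
              have hmn : ((pos - n + 1) / n - (d-k-1))*n
                  = ((pos - n + 1) / n)*n - (d-k-1)*n := by ring
              have hm1 : 1 ≤ (pos - n + 1) / n - (d-k-1) := by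
                by_contra hcon
                rw [Int.not_le] at hcon
                have hb : ((pos - n + 1) / n - (d-k-1))*n ≤ 0*n :=
                  mul_le_mul_of_nonneg_right (by omega) (by omega)
                omega
              have hprod : ((pos - n + 1) / n - (d-k-1))*(n-1)
                  = ((pos - n + 1) / n - (d-k-1))*n - ((pos - n + 1) / n - (d-k-1)) := by ring
              have hmge : 1*1 ≤ ((pos - n + 1) / n - (d-k-1))*(n-1) :=
                mul_le_mul hm1 (by omega) (by omega) (by omega)
              rw [mem_bpref hd0]
              exact ⟨(pos - n + 1) / n, (pos - n + 1) % n, hq0, hqn, ht0, ht1, by omega, by omega⟩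
            simp only [if_neg hnapp]
            apply ih d (k+1) num _ arr hd0 hd2n (by omega) (by rw [hpose]; ring) ?_ (by omega)
            rw [harr,
                show max (d - (k+1)) (max 0 (d - n + 1)) = max (d - k) (max 0 (d - n + 1)) from by omega]

-- ===== VERDICT (by name: the statement is the Claim_ definition above) =====
theorem get_iso_spec : Claim_equal_get_iso := by
  intro square _
  unfold Spec_get_iso
  by_cases h2 : 2 ≤ square
  case pos =>
    rw [alt_eq_bpref]
    unfold get_iso
    simp only [get_iso_loop, if_pos (show (0:Int) < square * 2 from by omega),
               if_pos (show (0:Int) < square from by omega)]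
    rw [if_pos (show (0:Int)*square < square*square ∧ (0:Int)*square ∉ ([] : List Int) from
      ⟨by nlinarith, by simp⟩)]
    rw [show (0:Int)*square = 0 from zero_mul _]
    apply loop_main square h2 _ 0 0 0 0 _ (by omega) (by omega) (by omega) (by ring) ?_ ?_
    · rw [show bpref square 0 = [] from by
          unfold bpref; rw [pyRange_one_empty (le_refl 0)]; rfl,
        show max ((0:Int) - 0) (max 0 (0 - square + 1)) = 0 from by omega]
      unfold diagFrom
      rw [show min (0:Int) (square - 1) = 0 from by omega, pyRange_neg_one_singleton 0]
      simp
    · have e2 : (2*square).toNat * ((2*square*square).toNat + 1)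
          = (2*square - (0+1)).toNat * ((2*square*square).toNat + 1)
            + ((2*square*square).toNat + 1) := by
        rw [show (2*square).toNat = (2*square - (0+1)).toNat + 1 from by omega]
        ring
      omega
  case neg =>
    by_cases h1 : square = 1
    · subst h1; decide
    · -- square ≤ 0: both sides are []
      rw [alt_eq_bpref]
      unfold get_iso
      rw [show (2*square).toNat = 0 from by omega]
      simp only [Nat.zero_mul, get_iso_loop,
                 if_neg (show ¬ ((0:Int) < square * 2) from by omega)]
      unfold bpref
      rw [pyRange_one_empty (by omega)]
      rfl
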